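-- pv_equiv track=rewrite | github.com/andersoncantenas-glitch/rotahub-api | release.py | suggest_release_kind
-- ===== SOURCE A (Python) =====
-- from typing import Iterable
--
-- def suggest_release_kind(files: Iterable[str]) -> str:
--     changed = [str(f).replace("\\", "/").lower() for f in files]
--     if not changed:
--         return "patch"
--
--     major_markers = (
--         "runtime_config.py",
--         "environment.py",
--         "database_runtime.py",
--         "server.py",
--         "api_server.py",
--         "render.yaml",
--         "config/",
--     )
--     minor_markers = (
--         "main.py",
--         "api_service.py",
--         "assets/",
--         "installer/",
--         "scripts/",
--     )
--
--     if any(any(marker in item for marker in major_markers) for item in changed):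
--         return "major"
--     if any(any(marker in item for marker in minor_markers) for item in changed):
--         return "minor"
--     return "patch"
-- ===== SOURCE B (Python) =====
-- def suggest_release_kind(files) -> str:
--     major_markers = (
--         "runtime_config.py",
--         "environment.py",
--         "database_runtime.py",
--         "server.py",
--         "api_server.py",
--         "render.yaml",
--         "config/",
--     )
--     minor_markers = (
--         "main.py",
--         "api_service.py",
--         "assets/",
--         "installer/",
--         "scripts/",
--     )
--
--     def rank(f):
--         p = str(f).replace("\\", "/").lower()
--         if any(m in p for m in major_markers):
--             return 2
--         if any(m in p for m in minor_markers):
--             return 1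
--         return 0
--
--     worst = 0
--     for f in files:
--         worst = max(worst, rank(f))
--     return "major" if worst == 2 else ("minor" if worst == 1 else "patch")
-- ===== Notes on version B (the rewrite author's own statement) =====
-- stated objective: alternative
-- what changed: Replaces A's two prioritized whole-list any-scans with a single pass that assigns each file a severity rank (2 major / 1 minor / 0) and reduces with max, mapping the max back to the kind string.
import Mathlib
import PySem

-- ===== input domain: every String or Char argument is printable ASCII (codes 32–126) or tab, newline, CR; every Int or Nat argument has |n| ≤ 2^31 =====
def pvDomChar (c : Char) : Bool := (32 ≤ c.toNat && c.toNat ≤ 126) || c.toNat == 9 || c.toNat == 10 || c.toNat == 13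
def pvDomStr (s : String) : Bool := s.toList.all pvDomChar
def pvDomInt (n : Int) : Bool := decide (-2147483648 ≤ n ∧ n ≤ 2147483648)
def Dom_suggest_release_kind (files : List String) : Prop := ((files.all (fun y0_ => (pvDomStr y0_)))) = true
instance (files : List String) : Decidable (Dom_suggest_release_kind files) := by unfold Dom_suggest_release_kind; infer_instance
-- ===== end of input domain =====

-- B is an alternative decomposition (per-file severity rank + max reduction) of A's two prioritized any-scans; same cost.

-- ===== PORT A =====
def pvMajorMarkers : List String :=
  ["runtime_config.py", "environment.py", "database_runtime.py", "server.py",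
   "api_server.py", "render.yaml", "config/"]

def pvMinorMarkers : List String :=
  ["main.py", "api_service.py", "assets/", "installer/", "scripts/"]

-- str(f).replace("\\", "/").lower()
def pvNorm (f : String) : String := PySem.Str.lower (PySem.Str.replace f "\\" "/")

def suggest_release_kind (files : List String) : String :=
  let changed := files.map pvNorm
  if changed = [] then "patch"
  else if changed.any (fun item => pvMajorMarkers.any (fun marker => PySem.Str.isIn marker item)) then "major"
  else if changed.any (fun item => pvMinorMarkers.any (fun marker => PySem.Str.isIn marker item)) then "minor"
  else "patch"

-- ===== PORT B =====
def pvRank (f : String) : Int :=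
  let p := pvNorm f
  if pvMajorMarkers.any (fun m => PySem.Str.isIn m p) then 2
  else if pvMinorMarkers.any (fun m => PySem.Str.isIn m p) then 1
  else 0

def suggest_release_kind_alt (files : List String) : String :=
  let worst := files.foldl (fun w f => max w (pvRank f)) 0
  if worst = 2 then "major" else if worst = 1 then "minor" else "patch"

-- ===== PRECONDITION & SPEC =====
def Spec_suggest_release_kind (files : List String) (out : String) : Prop := out = suggest_release_kind_alt files
instance (files : List String) (out : String) : Decidable (Spec_suggest_release_kind files out) := by unfold Spec_suggest_release_kind; infer_instance

-- ===== CLAIM (what is proved, stated in full; the proofs are below) =====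
def Claim_equal_suggest_release_kind : Prop := ∀ (files : List String), Dom_suggest_release_kind files → Spec_suggest_release_kind files (suggest_release_kind files)

-- ===== LEMMAS AND PROOFS =====

def pMaj (f : String) : Bool := pvMajorMarkers.any (fun m => PySem.Str.isIn m (pvNorm f))
def pMin (f : String) : Bool := pvMinorMarkers.any (fun m => PySem.Str.isIn m (pvNorm f))

theorem pvRank_eq (f : String) :
    pvRank f = if pMaj f then 2 else if pMin f then 1 else 0 := by
  simp [pvRank, pMaj, pMin]

theorem worst_eq (fs : List String) (w : Int) (hw : 0 ≤ w) :
    fs.foldl (fun w f => max w (pvRank f)) w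
      = max w (if fs.any pMaj then 2 else if fs.any pMin then 1 else 0) := by
  induction fs generalizing w with
  | nil => simp [max_def]; omega
  | cons f t ih =>
      rw [List.foldl_cons, ih _ (le_trans hw (le_max_left _ _)), pvRank_eq]
      cases hM : pMaj f <;> cases hm : pMin f <;>
        simp only [List.any_cons, hM, hm, Bool.false_or, Bool.true_or, if_true, max_def] <;>
        split_ifs <;> first | omega | simp_all

theorem anyMaj (l : List String) :
    ((l.map pvNorm).any fun item => pvMajorMarkers.any fun marker => PySem.Str.isIn marker item) = l.any pMaj := by
  induction l with
  | nil => simp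
  | cons f t ih => simp only [List.map_cons, List.any_cons, ih, pMaj]

theorem anyMin (l : List String) :
    ((l.map pvNorm).any fun item => pvMinorMarkers.any fun marker => PySem.Str.isIn marker item) = l.any pMin := by
  induction l with
  | nil => simp
  | cons f t ih => simp only [List.map_cons, List.any_cons, ih, pMin]

-- ===== VERDICT (by name: the statement is the Claim_ definition above) =====
theorem suggest_release_kind_spec : Claim_equal_suggest_release_kind := by
  intro files _
  show suggest_release_kind files = suggest_release_kind_alt files
  by_cases hnil : files = []
  · subst hnil; simp [suggest_release_kind, suggest_release_kind_alt]
  · simp only [suggest_release_kind, suggest_release_kind_alt]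
    rw [worst_eq files 0 le_rfl, anyMaj, anyMin,
        if_neg (by simpa [List.map_eq_nil_iff] using hnil)]
    cases hmaj : files.any pMaj <;> cases hmin : files.any pMin <;>
      simp_all
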